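-- pv_equiv track=rewrite | github.com/eclipse-velocitas/velocitas-lib | velocitas_lib/text_helper.py | replace_text_area
-- ===== SOURCE A (Python) =====
-- from typing import Callable, List, Optional
--
-- def replace_text_area(
--     text: List[str], start_occurence: str, end_occurence: str, replacement: str = ""
-- ) -> List[str]:
--     """Replace all occurrences of all text areas matching the parameters with a replacement.
--     If replacement for a line is empty, the line will be removed.
--
--     Args:
--         text (List[str]): All text lines to replace text within.
--         start_occurence (str): The starting line which matches the occurence for replacement text area.
--         start_occurence (str): The ending line which matches the occurence for replacement text area.
--         replacement (str): The replacement for text area.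
--     """
--     buffer = []
--     is_capturing = False
--     for line in text:
--         is_starting_match = not is_capturing and line.__contains__(start_occurence)
--         if is_starting_match:
--             is_capturing = True
--             continue
--
--         if is_capturing:
--             is_end_match = line.__contains__(end_occurence)
--             if is_end_match:
--                 is_capturing = False
--
--                 if replacement == "":
--                     continue
--
--                 replacement = line.replace(line, replacement)
--                 buffer.append(replacement)
--         else:
--             buffer.append(line)
--
--     return buffer
-- ===== SOURCE B (Python) =====
-- from typing import List
--
--
-- def replace_text_area(
--     text: List[str], start_occurence: str, end_occurence: str, replacement: str = ""
-- ) -> List[str]: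
--     """Consume the lines as start/end-delimited segments with an explicit iterator."""
--     out = []
--     it = iter(text)
--     for line in it:
--         if start_occurence in line:
--             for inner in it:
--                 if end_occurence in inner:
--                     if replacement != "":
--                         out.append(replacement)
--                     break
--         else:
--             out.append(line)
--     return out
-- ===== Notes on version B (the rewrite author's own statement) =====
-- stated objective: alternative
-- what changed: Replaced the is_capturing state flag with an explicit shared iterator consumed by an outer copy loop and an inner skip-until-end loop, and emits the replacement constant directly instead of rebinding it via line.replace(line, replacement).
import Mathlib
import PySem

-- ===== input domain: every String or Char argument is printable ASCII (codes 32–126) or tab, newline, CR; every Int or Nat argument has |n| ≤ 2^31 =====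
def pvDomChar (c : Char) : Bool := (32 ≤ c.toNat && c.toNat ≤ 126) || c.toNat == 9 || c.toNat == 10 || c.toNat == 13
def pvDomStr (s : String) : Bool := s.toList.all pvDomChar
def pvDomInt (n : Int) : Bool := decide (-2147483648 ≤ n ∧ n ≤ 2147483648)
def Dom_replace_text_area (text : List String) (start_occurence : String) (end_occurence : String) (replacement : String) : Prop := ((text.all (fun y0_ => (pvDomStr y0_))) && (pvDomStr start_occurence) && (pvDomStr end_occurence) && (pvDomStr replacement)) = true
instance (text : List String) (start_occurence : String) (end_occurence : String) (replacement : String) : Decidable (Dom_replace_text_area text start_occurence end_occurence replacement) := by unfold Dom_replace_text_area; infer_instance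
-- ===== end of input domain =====

-- B consumes the lines as start/end-delimited segments via a nested iterator loop instead of A's
-- is_capturing flag (objective: alternative decomposition, same cost).

-- ===== PORT A =====
-- One step of A's for-loop over the state (buffer, is_capturing, replacement);
-- note A rebinds `replacement` via line.replace(line, replacement).
def rtaStep (start_occurence : String) (end_occurence : String)
    (acc : List String × Bool × String) (line : String) : List String × Bool × String :=
  let buffer := acc.1
  let is_capturing := acc.2.1
  let replacement := acc.2.2
  let is_starting_match := !is_capturing && PySem.Str.isIn start_occurence line
  if is_starting_match then
    (buffer, true, replacement)
  else if is_capturing then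
    let is_end_match := PySem.Str.isIn end_occurence line
    if is_end_match then
      if replacement == "" then (buffer, false, replacement)
      else
        let replacement' := PySem.Str.replace line line replacement
        (buffer ++ [replacement'], false, replacement')
    else (buffer, is_capturing, replacement)
  else (buffer ++ [line], is_capturing, replacement)

def replace_text_area (text : List String) (start_occurence : String) (end_occurence : String) (replacement : String) : List String :=
  (text.foldl (rtaStep start_occurence end_occurence) ([], false, replacement)).1

-- ===== PORT B =====
mutual
  -- outer loop: copy lines until a line contains start_occurence
  def rtaGo (text : List String) (start_occurence : String) (end_occurence : String) (replacement : String) : List String :=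
    match text with
    | [] => []
    | line :: rest =>
      if PySem.Str.isIn start_occurence line then
        rtaSkip rest start_occurence end_occurence replacement
      else
        line :: rtaGo rest start_occurence end_occurence replacement
  -- inner loop: skip lines until one contains end_occurence, then emit replacement (if nonempty)
  def rtaSkip (text : List String) (start_occurence : String) (end_occurence : String) (replacement : String) : List String :=
    match text with
    | [] => []
    | inner :: rest =>
      if PySem.Str.isIn end_occurence inner then
        if replacement != "" then
          replacement :: rtaGo rest start_occurence end_occurence replacement
        else
          rtaGo rest start_occurence end_occurence replacement
      else
        rtaSkip rest start_occurence end_occurence replacement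
end

def replace_text_area_alt (text : List String) (start_occurence : String) (end_occurence : String) (replacement : String) : List String :=
  rtaGo text start_occurence end_occurence replacement

-- ===== PRECONDITION & SPEC =====
def Spec_replace_text_area (text : List String) (start_occurence : String) (end_occurence : String) (replacement : String) (out : List String) : Prop := out = replace_text_area_alt text start_occurence end_occurence replacement
instance (text : List String) (start_occurence : String) (end_occurence : String) (replacement : String) (out : List String) : Decidable (Spec_replace_text_area text start_occurence end_occurence replacement out) := by unfold Spec_replace_text_area; infer_instance

-- ===== CLAIM (what is proved, stated in full; the proofs are below) =====
def Claim_equal_replace_text_area : Prop := ∀ (text : List String) (start_occurence : String) (end_occurence : String) (replacement : String), Dom_replace_text_area text start_occurence end_occurence replacement → Spec_replace_text_area text start_occurence end_occurence replacement (replace_text_area text start_occurence end_occurence replacement)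

-- ===== LEMMAS AND PROOFS =====

-- `l.replace(l, r)` in Python is always exactly `r`.
theorem go_nil (old new : List Char) (fuel : Nat) (acc : List Char) :
    PySem.Chars.replace.go old new fuel [] acc = acc.reverse := by
  cases fuel <;> simp [PySem.Chars.replace.go]

theorem chars_replace_self (l r : List Char) : PySem.Chars.replace l l r = r := by
  cases l with
  | nil => simp [PySem.Chars.replace]
  | cons c t =>
    rw [PySem.Chars.replace]
    simp only [List.isEmpty_cons, Bool.false_eq_true, if_false, List.length_cons]
    rw [PySem.Chars.replace.go]
    simp [List.isPrefixOf_iff_prefix, go_nil]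

theorem str_replace_self (l r : String) : PySem.Str.replace l l r = r := by
  rw [PySem.Str.replace, chars_replace_self]
  simp

-- The fold invariant: starting from any buffer and flag, A's fold produces
-- buffer ++ (B's remaining output for that flag state).
theorem rta_fold_invariant (s e : String) (text : List String) :
    ∀ (buffer : List String) (cap : Bool) (r : String),
      (text.foldl (rtaStep s e) (buffer, cap, r)).1 =
        buffer ++ (if cap then rtaSkip text s e r else rtaGo text s e r) := by
  induction text with
  | nil => intro buffer cap r; cases cap <;> simp [rtaGo, rtaSkip]
  | cons line rest ih =>
    intro buffer cap r
    cases cap with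
    | false =>
      simp only [List.foldl_cons, rtaStep, rtaGo]
      by_cases h : PySem.Chars.isIn s.toList line.toList = true
      · simp [h, ih]
      · simp [h, ih]
    | true =>
      simp only [List.foldl_cons, rtaStep, rtaSkip]
      by_cases h : PySem.Chars.isIn e.toList line.toList = true
      · by_cases hr : r = ""
        · simp [h, hr, ih]
        · simp [h, hr, ih, str_replace_self]
      · simp [h, ih]

-- ===== VERDICT (by name: the statement is the Claim_ definition above) =====
theorem replace_text_area_spec : Claim_equal_replace_text_area := by
  intro text s e r _
  unfold Spec_replace_text_area replace_text_area replace_text_area_alt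
  simpa using rta_fold_invariant s e text [] false r
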